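-- pv_equiv track=rewrite | github.com/21david/LeetCode-solutions | Hard/Expression Add Operators.py | eval_mult
-- ===== SOURCE A (Python) =====
-- def eval_mult(exp):
--     l = 0 # left (start of multiplication expression)
--     r = 1 # right (end of multiplication expression)
--     m = None # index of multiplication operator
--
--     while r < len(exp):
--         if exp[r] == '+' or exp[r] == '-':
--             l = r + 1
--         elif exp[r] == '*':
--             m = r
--             r += 1
--             while r < len(exp) and exp[r].isdigit():
--                 r += 1
--             # We know locations of the start of the first number, the multiplication
--             # operator, and the end of the last number. With these, we can multiply.
--             product = int(exp[l:m]) * int(exp[m+1:r])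
--             exp = exp[:l] + str(product) + exp[r:]
--             r = l # fix index of r after editing 'exp'
--         r += 1
--
--     return exp
-- ===== SOURCE B (Python) =====
-- def collapse(seg):
--     # reduce the '*'-chain of one additive segment, keeping the running
--     # factor as a string exactly as the expression does
--     if '*' not in seg:
--         return seg
--     ts = seg.split('*')
--     t = ts[0]
--     for u in ts[1:]:
--         t = str(int(t) * int(u))
--     return t
--
-- def eval_mult(exp):
--     out = ''
--     seg = ''
--     for ch in exp:
--         if ch == '+' or ch == '-':
--             out += collapse(seg) + ch
--             seg = ''
--         else:
--             seg += ch
--     return out + collapse(seg)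
-- ===== Notes on version B (the rewrite author's own statement) =====
-- stated objective: faster
-- what changed: B makes a single pass that splits the expression at '+'/'-' and reduces each segment's '*'-chain with one split/fold, instead of A's loop that re-splices the whole string and rescans from the segment start after every multiplication.
-- outside the precondition, e.g. on eval_mult('*'): A returns '*', B raises ValueError; on eval_mult('*5'): A returns '*5', B raises ValueError; on eval_mult('xx+3*4yy'): A returns 'xx+12yy', B raises ValueError
import Mathlib
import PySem

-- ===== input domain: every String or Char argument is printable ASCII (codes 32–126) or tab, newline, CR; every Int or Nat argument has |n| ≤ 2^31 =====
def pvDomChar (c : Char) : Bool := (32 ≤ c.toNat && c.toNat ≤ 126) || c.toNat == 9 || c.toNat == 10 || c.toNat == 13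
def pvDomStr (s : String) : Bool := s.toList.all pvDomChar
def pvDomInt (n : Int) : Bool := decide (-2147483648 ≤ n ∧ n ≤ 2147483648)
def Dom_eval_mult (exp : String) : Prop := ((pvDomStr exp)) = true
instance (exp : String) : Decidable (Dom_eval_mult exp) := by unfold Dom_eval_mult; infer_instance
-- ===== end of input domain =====

-- B collapses each additive segment's '*'-chain in one left-to-right split/join pass instead of
-- repeatedly re-splicing and re-scanning the whole string; return values agree with A on Pre_.

-- ===== PORT A =====

-- '*' never occurs in str(int): needed as the termination measure of A's while-loop
-- (each multiplication consumes one '*' of the string; between multiplications r only grows).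
theorem pvStar_not_mem_toDigitsCore (fuel n : Nat) (acc : List Char)
    (hacc : '*' ∉ acc) : '*' ∉ Nat.toDigitsCore 10 fuel n acc := by
  induction fuel generalizing n acc with
  | zero => simpa [Nat.toDigitsCore]
  | succ fuel ih =>
    simp only [Nat.toDigitsCore]
    have hd : (n % 10).digitChar ≠ '*' := by
      have : n % 10 < 10 := Nat.mod_lt _ (by norm_num)
      interval_cases h : n % 10 <;> decide
    split
    · simp only [List.mem_cons, not_or]
      exact ⟨fun h => hd h.symm, hacc⟩
    · exact ih _ _ (by simp only [List.mem_cons, not_or]; exact ⟨fun h => hd h.symm, hacc⟩)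

theorem pvStar_not_mem_toChars (p : Int) : '*' ∉ PySem.Int.toChars p := by
  unfold PySem.Int.toChars
  split
  · intro h
    rcases List.mem_cons.mp h with h | h
    · exact absurd h (by decide)
    · exact pvStar_not_mem_toDigitsCore _ _ _ (by simp) h
  · exact pvStar_not_mem_toDigitsCore _ _ _ (by simp)

theorem pvCount_star_lt (exp : List Char) (l k n : Nat) (p : Int)
    (h : l + k < exp.length) (hc : exp[l + k] = '*') :
    (exp.take l ++ PySem.Int.toChars p ++ exp.drop (l + k + 1 + n)).count '*'
      < exp.count '*' := by
  have h1 : (exp.take l).count '*' ≤ (exp.take (l + k)).count '*' := by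
    have : exp.take l = (exp.take (l + k)).take l := by
      rw [List.take_take]; congr 1; omega
    rw [this]
    exact (List.take_sublist _ _).count_le _
  have h2 : (exp.drop (l + k + 1 + n)).count '*' ≤ (exp.drop (l + k + 1)).count '*' := by
    have : exp.drop (l + k + 1 + n) = (exp.drop (l + k + 1)).drop n := by
      rw [List.drop_drop]
    rw [this]
    exact (List.drop_sublist _ _).count_le _
  have h3 : exp.count '*' = (exp.take (l + k)).count '*' + (exp.drop (l + k)).count '*' := by
    conv_lhs => rw [← List.take_append_drop (l + k) exp]
    rw [List.count_append]
  have h4 : exp.drop (l + k) = '*' :: exp.drop (l + k + 1) := by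
    rw [List.drop_eq_getElem_cons h, hc]
  have h5 : (PySem.Int.toChars p).count '*' = 0 :=
    List.count_eq_zero_of_not_mem (pvStar_not_mem_toChars p)
  rw [h4] at h3
  simp only [List.count_append, List.count_cons_self, h5] at h1 h2 h3 ⊢
  omega

-- Literal port of A's while-loop on exp.toList.  A keeps l ≤ r throughout
-- (l is only ever set to r+1 together with r, and r is reset to l then incremented),
-- so r is represented as l + k with k : Nat.  The inner `while exp[r].isdigit(): r += 1`
-- is ported as takeWhile on the remaining characters.  Where Python's int() raises
-- ValueError (excluded by Pre_), `.getD 0` supplies an arbitrary value.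
def pyLoopA (exp : List Char) (l k : Nat) : List Char :=
  if h : l + k < exp.length then
    let c := exp[l + k]
    if c = '+' ∨ c = '-' then pyLoopA exp (l + k + 1) 0
    else if hc : c = '*' then
      let num := (exp.drop (l + k + 1)).takeWhile PySem.Chars.isdigit
      let a := (PySem.Int.ofChars? (PySem.List.slice exp (some (l : Int)) (some ((l + k : Nat) : Int)))).getD 0
      let b := (PySem.Int.ofChars? num).getD 0
      pyLoopA (PySem.List.slice exp none (some (l : Int)) ++ PySem.Int.toChars (a * b)
        ++ PySem.List.slice exp (some ((l + k + 1 + num.length : Nat) : Int)) none) l 1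
    else pyLoopA exp l (k + 1)
  else exp
termination_by (exp.count '*', exp.length - (l + k))
decreasing_by
  · exact Prod.Lex.right _ (by omega)
  · apply Prod.Lex.left
    have h2 := pvCount_star_lt exp l k
      ((exp.drop (l + k + 1)).takeWhile PySem.Chars.isdigit).length
      ((PySem.Int.ofChars? (PySem.List.slice exp (some (l : Int)) (some ((l + k : Nat) : Int)))).getD 0 *
        (PySem.Int.ofChars? ((exp.drop (l + k + 1)).takeWhile PySem.Chars.isdigit)).getD 0) h hc
    simpa only [← Nat.cast_add, PySem.List.slice_to_natCast, PySem.List.slice_from_natCast] using h2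
  · exact Prod.Lex.right _ (by omega)

def eval_mult (exp : String) : String :=
  String.ofList (pyLoopA exp.toList 0 1)

-- ===== PORT B =====

def pyCollapse (seg : List Char) : List Char :=
  if PySem.Chars.isIn ['*'] seg then
    let ts := PySem.Chars.splitOn seg ['*']
    let t := ts.headD []
    (ts.drop 1).foldl
      (fun t u => PySem.Int.toChars ((PySem.Int.ofChars? t).getD 0 * (PySem.Int.ofChars? u).getD 0)) t
  else seg

def pyStepB (st : List Char × List Char) (c : Char) : List Char × List Char :=
  if c = '+' ∨ c = '-' then (st.1 ++ pyCollapse st.2 ++ [c], []) else (st.1, st.2 ++ [c])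

def eval_mult_alt (exp : String) : String :=
  let st := exp.toList.foldl pyStepB ([], [])
  String.ofList (st.1 ++ pyCollapse st.2)

-- ===== PRECONDITION & SPEC =====

def pvIsOp3 (c : Char) : Bool := c = '+' || c = '-' || c = '*'

-- digit⁺ (op digit⁺)* recognizer; `seen` records whether the current number is nonempty
def pvWf : List Char → Bool → Bool
  | [], seen => seen
  | c :: cs, seen =>
    if PySem.Chars.isdigit c then pvWf cs true
    else if pvIsOp3 c then seen && pvWf cs false
    else false

-- Pre_ excludes strings that contain '*' but are not plain digit expressions num(op num)*:
-- on those A either raises ValueError (int() applied to a slice that is not a number) or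
-- returns accidental values of its index bookkeeping (a '*' at index 0 is never examined
-- because r starts at 1), while B's segment parser raises there.
def Pre_eval_mult (exp : String) : Prop :=
  PySem.Str.isIn "*" exp = false ∨ pvWf exp.toList false = true

instance (exp : String) : Decidable (Pre_eval_mult exp) := by unfold Pre_eval_mult; infer_instance

def pvWitness_eval_mult : String := "12*3+4*05-6"

def Spec_eval_mult (exp : String) (out : String) : Prop := out = eval_mult_alt exp
instance (exp : String) (out : String) : Decidable (Spec_eval_mult exp out) := by unfold Spec_eval_mult; infer_instance

-- ===== CLAIM (what is proved, stated in full; the proofs are below) =====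
def Claim_equal_eval_mult : Prop :=
  ∀ (exp : String), Dom_eval_mult exp → Pre_eval_mult exp → Spec_eval_mult exp (eval_mult exp)


-- ===== LEMMAS AND PROOFS =====

-- ---- small character facts ----

theorem pvDigit_not_plus_minus {c : Char} (h : PySem.Chars.isdigit c = true) :
    (c = '+' ∨ c = '-') = False := by
  simp only [PySem.Chars.isdigit, Bool.and_eq_true, decide_eq_true_eq] at h
  simp only [eq_iff_iff, iff_false]
  rintro (rfl | rfl) <;> revert h <;> decide

theorem pvDigit_not_star {c : Char} (h : PySem.Chars.isdigit c = true) : ¬ c = '*' := by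
  simp only [PySem.Chars.isdigit, Bool.and_eq_true, decide_eq_true_eq] at h
  rintro rfl; revert h; decide

theorem pvOp2_not_digit {c : Char} (h : c = '+' ∨ c = '-') :
    PySem.Chars.isdigit c = false := by
  rcases h with rfl | rfl <;> decide

-- ---- list glue ----

theorem pvTakeWhile_drop (p : Char → Bool) (l : List Char) :
    l.takeWhile p ++ l.drop (l.takeWhile p).length = l := by
  conv_rhs => rw [← List.takeWhile_append_dropWhile (p := p) (l := l)]
  congr 1
  induction l with
  | nil => rfl
  | cons c cs ih =>
    by_cases hc : p c
    · simp [List.takeWhile_cons, List.dropWhile_cons, hc, ih]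
    · simp [List.takeWhile_cons, List.dropWhile_cons, hc]

theorem pvTakeWhile_append (p : Char → Bool) (xs ys : List Char)
    (hx : ∀ c ∈ xs, p c = true)
    (hy : ys = [] ∨ ∃ c cs, ys = c :: cs ∧ p c = false) :
    (xs ++ ys).takeWhile p = xs ∧ (xs ++ ys).drop xs.length = ys := by
  constructor
  · induction xs with
    | nil =>
      rcases hy with rfl | ⟨c, cs, rfl, hc⟩
      · rfl
      · simp [List.takeWhile_cons, hc]
    | cons x xs ih =>
      have := hx x (by simp)
      simp only [List.cons_append, List.takeWhile_cons, this, if_true]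
      rw [ih (fun c hc => hx c (by simp [hc]))]
  · simpa using List.drop_left xs ys

-- ---- pvWf / tail structure ----

def pvTail (rest : List Char) : Bool :=
  match rest with
  | [] => true
  | c :: cs => pvIsOp3 c && pvWf cs false

theorem pvWf_true_decomp : ∀ cs : List Char, pvWf cs true = true →
    pvTail (cs.drop (cs.takeWhile PySem.Chars.isdigit).length) = true := by
  intro cs
  induction cs with
  | nil => intro _; rfl
  | cons c cs ih =>
    intro h
    simp only [pvWf] at h
    by_cases hd : PySem.Chars.isdigit c
    · rw [hd] at h
      simp only [if_true] at h
      simpa [List.takeWhile_cons, hd] using ih h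
    · simp only [hd] at h
      simp only [Bool.false_eq_true, if_false] at h
      by_cases hop : pvIsOp3 c
      · simp only [List.takeWhile_cons, hd, if_false, Bool.false_eq_true, List.length_nil,
          List.drop_zero]
        simp only [hop, if_true, Bool.true_and] at h
        simp [pvTail, hop, h]
      · simp [hop] at h

theorem pvWf_false_decomp : ∀ cs : List Char, pvWf cs false = true →
    cs.takeWhile PySem.Chars.isdigit ≠ [] ∧
    pvTail (cs.drop (cs.takeWhile PySem.Chars.isdigit).length) = true := by
  intro cs h
  cases cs with
  | nil => simp [pvWf] at h
  | cons c cs =>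
    simp only [pvWf] at h
    by_cases hd : PySem.Chars.isdigit c
    · rw [hd] at h; simp only [if_true] at h
      refine ⟨by simp [List.takeWhile_cons, hd], ?_⟩
      simpa [List.takeWhile_cons, hd] using pvWf_true_decomp cs h
    · simp only [hd] at h
      simp only [Bool.false_eq_true, if_false] at h
      by_cases hop : pvIsOp3 c
      · simp [hop] at h
      · simp [hop] at h

-- ---- str(int) output shape ----

theorem pvDigitChar_isdigit {m : Nat} (h : m < 10) :
    PySem.Chars.isdigit (Nat.digitChar m) = true := by
  interval_cases m <;> decide

theorem pvToDigitsCore_digits (fuel : Nat) : ∀ (n : Nat) (acc : List Char),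
    (∀ c ∈ acc, PySem.Chars.isdigit c = true) →
    ∀ c ∈ Nat.toDigitsCore 10 fuel n acc, PySem.Chars.isdigit c = true := by
  induction fuel with
  | zero => intro n acc hacc; simpa [Nat.toDigitsCore] using hacc
  | succ fuel ih =>
    intro n acc hacc
    have hd : PySem.Chars.isdigit ((n % 10).digitChar) = true :=
      pvDigitChar_isdigit (Nat.mod_lt _ (by norm_num))
    simp only [Nat.toDigitsCore]
    split
    · intro c hc
      rcases List.mem_cons.mp hc with rfl | hc
      · exact hd
      · exact hacc _ hc
    · exact ih _ _ (by
        intro c hc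
        rcases List.mem_cons.mp hc with rfl | hc
        · exact hd
        · exact hacc _ hc)

theorem pvToDigitsCore_ne_nil (fuel : Nat) : ∀ (n : Nat) (acc : List Char),
    0 < fuel ∨ acc ≠ [] → Nat.toDigitsCore 10 fuel n acc ≠ [] := by
  induction fuel with
  | zero =>
    intro n acc h
    rcases h with h | h
    · omega
    · simpa [Nat.toDigitsCore]
  | succ fuel ih =>
    intro n acc _
    simp only [Nat.toDigitsCore]
    split
    · simp
    · exact ih _ _ (Or.inr (by simp))

theorem pvToChars_ne_nil (p : Int) : PySem.Int.toChars p ≠ [] := by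
  unfold PySem.Int.toChars
  split
  · simp
  · exact pvToDigitsCore_ne_nil _ _ _ (Or.inl (by omega))

theorem pvToChars_drop1_digits (p : Int) :
    ∀ c ∈ (PySem.Int.toChars p).drop 1, PySem.Chars.isdigit c = true := by
  unfold PySem.Int.toChars
  split
  · intro c hc
    simp only [List.drop_succ_cons, List.drop_zero] at hc
    exact pvToDigitsCore_digits (p.natAbs + 1) p.natAbs [] (by simp) c
      (by simpa [Nat.toDigits] using hc)
  · intro c hc
    exact pvToDigitsCore_digits (p.toNat + 1) p.toNat [] (by simp) c
      (by simpa [Nat.toDigits] using List.mem_of_mem_drop hc)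

-- ---- the common per-segment reduction both programs perform ----

def pvF (t u : List Char) : List Char :=
  PySem.Int.toChars ((PySem.Int.ofChars? t).getD 0 * (PySem.Int.ofChars? u).getD 0)

def pvProc (cur : List Char) : List Char → List Char
  | [] => cur
  | c :: rs =>
    if c = '*' then
      pvProc (pvF cur (rs.takeWhile PySem.Chars.isdigit))
        (rs.drop (rs.takeWhile PySem.Chars.isdigit).length)
    else
      cur ++ c :: pvProc (rs.takeWhile PySem.Chars.isdigit)
        (rs.drop (rs.takeWhile PySem.Chars.isdigit).length)
termination_by rest => rest.length
decreasing_by all_goals (simp only [List.length_drop, List.length_cons]; omega)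

-- ---- A-side: running the loop over a decomposed string ----

theorem pvGet_mid (pre cur rest : List Char) (k : Nat) (hk : k < cur.length)
    (h : pre.length + k < (pre ++ cur ++ rest).length) :
    (pre ++ cur ++ rest)[pre.length + k]'h = cur[k] := by
  rw [List.getElem_append]
  rw [dif_pos (by simp only [List.length_append]; omega)]
  rw [List.getElem_append]
  rw [dif_neg (by omega)]
  congr 1
  omega

theorem pvGet_boundary (pre cur rs : List Char) (c : Char)
    (h : pre.length + cur.length < (pre ++ cur ++ c :: rs).length) :
    (pre ++ cur ++ c :: rs)[pre.length + cur.length]'h = c := by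
  exact List.getElem_of_append rfl (by simp)

theorem pvScan (pre cur rest : List Char) :
    ∀ (n k : Nat), cur.length - k ≤ n → k ≤ cur.length →
    (∀ c ∈ cur.drop k, PySem.Chars.isdigit c = true) →
    pyLoopA (pre ++ cur ++ rest) pre.length k
      = pyLoopA (pre ++ cur ++ rest) pre.length cur.length := by
  intro n
  induction n with
  | zero =>
    intro k hn hk _
    have : k = cur.length := by omega
    rw [this]
  | succ n ih =>
    intro k hn hk hdig
    by_cases hlt : k < cur.length
    · have hin : pre.length + k < (pre ++ cur ++ rest).length := by simp; omega
      have hdrop : cur.drop k = cur[k] :: cur.drop (k + 1) := List.drop_eq_getElem_cons hlt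
      have hmem : cur[k] ∈ cur.drop k := by
        have h9 : cur[k] ∈ cur[k] :: cur.drop (k + 1) := List.mem_cons_self
        rw [← hdrop] at h9
        exact h9
      have hdk : PySem.Chars.isdigit cur[k] = true := hdig _ hmem
      rw [pyLoopA]
      rw [dif_pos hin]
      simp only [pvGet_mid pre cur rest k hlt hin]
      rw [if_neg (by rw [pvDigit_not_plus_minus hdk]; exact not_false)]
      rw [dif_neg (pvDigit_not_star hdk)]
      exact ih (k + 1) (by omega) (by omega)
        (fun c hc => hdig c (by rw [hdrop]; exact List.mem_cons_of_mem _ hc))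
    · have : k = cur.length := by omega
      rw [this]

theorem pvIsOp3_cases {c : Char} (h : pvIsOp3 c = true) : c = '+' ∨ c = '-' ∨ c = '*' := by
  simpa [pvIsOp3, or_assoc] using h

theorem pvDrop_boundary (pre cur rs : List Char) (c : Char) (j : Nat) :
    (pre ++ cur ++ c :: rs).drop (pre.length + cur.length + 1 + j) = rs.drop j := by
  rw [List.append_assoc]
  rw [List.drop_append]
  rw [List.drop_append]
  rw [List.drop_eq_nil_of_le (by omega), List.drop_eq_nil_of_le (by omega)]
  simp only [List.nil_append]
  rw [show pre.length + cur.length + 1 + j - pre.length - cur.length = j + 1 by omega]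
  rw [List.drop_succ_cons]

theorem pvMainA (n : Nat) : ∀ (rest pre cur : List Char) (k : Nat),
    rest.length ≤ n → cur ≠ [] → k ≤ cur.length →
    (∀ c ∈ cur.drop k, PySem.Chars.isdigit c = true) →
    pvTail rest = true →
    pyLoopA (pre ++ cur ++ rest) pre.length k = pre ++ pvProc cur rest := by
  induction n with
  | zero =>
    intro rest pre cur k hn hcur hk hdig htail
    have hrest : rest = [] := by
      cases rest with
      | nil => rfl
      | cons c rs => simp at hn
    subst hrest
    rw [pvScan pre cur [] cur.length k (by omega) hk hdig]
    rw [pyLoopA]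
    rw [dif_neg (by simp)]
    simp [pvProc]
  | succ n ih =>
    intro rest pre cur k hn hcur hk hdig htail
    rw [pvScan pre cur rest cur.length k (by omega) hk hdig]
    cases rest with
    | nil =>
      rw [pyLoopA]
      rw [dif_neg (by simp)]
      simp [pvProc]
    | cons c rs =>
      have htail' : pvIsOp3 c = true ∧ pvWf rs false = true := by
        simpa [pvTail, Bool.and_eq_true] using htail
      obtain ⟨hnum_ne, htail2⟩ := pvWf_false_decomp rs htail'.2
      have hnumdig : ∀ d ∈ rs.takeWhile PySem.Chars.isdigit, PySem.Chars.isdigit d = true :=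
        fun d hd => List.mem_takeWhile_imp hd
      have hsplit : rs.takeWhile PySem.Chars.isdigit
          ++ rs.drop (rs.takeWhile PySem.Chars.isdigit).length = rs :=
        pvTakeWhile_drop _ rs
      have hin : pre.length + cur.length < (pre ++ cur ++ c :: rs).length := by
        simp only [List.length_append, List.length_cons]; omega
      have hlen' : (rs.drop (rs.takeWhile PySem.Chars.isdigit).length).length ≤ n := by
        simp only [List.length_drop]
        have : rs.length + 1 ≤ n + 1 := by simpa using hn
        omega
      rw [pyLoopA]
      rw [dif_pos hin]
      simp only [pvGet_boundary pre cur rs c hin]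
      rcases pvIsOp3_cases htail'.1 with hc | hc | hc
      · -- c = '+'
        subst hc
        rw [if_pos (Or.inl rfl)]
        have hexp : pre ++ cur ++ '+' :: rs
            = (pre ++ cur ++ ['+']) ++ rs.takeWhile PySem.Chars.isdigit
              ++ rs.drop (rs.takeWhile PySem.Chars.isdigit).length := by
          conv_lhs => rw [← hsplit]
          simp [List.append_assoc]
        have hidx : pre.length + cur.length + 1 = (pre ++ cur ++ ['+']).length := by
          simp only [List.length_append, List.length_cons, List.length_nil]
        rw [hexp, hidx]
        rw [ih _ _ _ 0 hlen' hnum_ne (Nat.zero_le _) (by simpa using hnumdig) htail2]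
        rw [pvProc]
        rw [if_neg (by decide)]
        simp [List.append_assoc]
      · -- c = '-'
        subst hc
        rw [if_pos (Or.inr rfl)]
        have hexp : pre ++ cur ++ '-' :: rs
            = (pre ++ cur ++ ['-']) ++ rs.takeWhile PySem.Chars.isdigit
              ++ rs.drop (rs.takeWhile PySem.Chars.isdigit).length := by
          conv_lhs => rw [← hsplit]
          simp [List.append_assoc]
        have hidx : pre.length + cur.length + 1 = (pre ++ cur ++ ['-']).length := by
          simp only [List.length_append, List.length_cons, List.length_nil]
        rw [hexp, hidx]
        rw [ih _ _ _ 0 hlen' hnum_ne (Nat.zero_le _) (by simpa using hnumdig) htail2]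
        rw [pvProc]
        rw [if_neg (by decide)]
        simp [List.append_assoc]
      · -- c = '*'
        subst hc
        rw [if_neg (by decide)]
        rw [dif_pos rfl]
        have hdrop0 : (pre ++ cur ++ '*' :: rs).drop (pre.length + cur.length + 1) = rs := by
          simpa using pvDrop_boundary pre cur rs '*' 0
        have hpre2 : PySem.List.slice (pre ++ cur ++ '*' :: rs) none (some (pre.length : Int))
            = pre := by
          rw [PySem.List.slice_to_natCast, List.append_assoc, List.take_left]
        have hcur2 : PySem.List.slice (pre ++ cur ++ '*' :: rs) (some (pre.length : Int))
            (some ((pre.length + cur.length : Nat) : Int)) = cur := by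
          rw [PySem.List.slice_natCast,
            show pre.length + cur.length - pre.length = cur.length by omega,
            List.append_assoc, List.drop_left, List.take_left]
        have hsuf : ∀ j : Nat, PySem.List.slice (pre ++ cur ++ '*' :: rs)
            (some ((pre.length + cur.length + 1 + j : Nat) : Int)) none = rs.drop j := by
          intro j
          rw [PySem.List.slice_from_natCast, pvDrop_boundary]
        rw [hdrop0, hpre2, hcur2, hsuf]
        rw [pvProc]
        rw [if_pos rfl]
        exact ih _ pre (pvF cur (rs.takeWhile PySem.Chars.isdigit)) 1 hlen'
          (by unfold pvF; exact pvToChars_ne_nil _)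
          (by
            have h1 : (pvF cur (rs.takeWhile PySem.Chars.isdigit)).length ≠ 0 := by
              simpa [List.length_eq_zero_iff] using
                (by unfold pvF; exact pvToChars_ne_nil _ :
                  pvF cur (rs.takeWhile PySem.Chars.isdigit) ≠ [])
            omega)
          (by unfold pvF; exact pvToChars_drop1_digits _) htail2

-- ---- B-side: the fold, segment eating, and split ----

def pvProcB (seg : List Char) : List Char → List Char
  | [] => pyCollapse seg
  | c :: cs => if c = '+' ∨ c = '-' then pyCollapse seg ++ c :: pvProcB [] cs
               else pvProcB (seg ++ [c]) cs

theorem pvFoldB : ∀ (cs : List Char) (out seg : List Char),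
    (cs.foldl pyStepB (out, seg)).1 ++ pyCollapse (cs.foldl pyStepB (out, seg)).2
      = out ++ pvProcB seg cs := by
  intro cs
  induction cs with
  | nil => intro out seg; rfl
  | cons c cs ih =>
    intro out seg
    by_cases hc : c = '+' ∨ c = '-'
    · simp only [List.foldl_cons, pyStepB, if_pos hc, pvProcB, ih]
      simp [List.append_assoc]
    · simp only [List.foldl_cons, pyStepB, if_neg hc, pvProcB, ih]

theorem pvEat : ∀ (xs seg rest : List Char),
    (∀ c ∈ xs, ¬(c = '+' ∨ c = '-')) →
    pvProcB seg (xs ++ rest) = pvProcB (seg ++ xs) rest := by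
  intro xs
  induction xs with
  | nil => intro seg rest _; simp
  | cons x xs ih =>
    intro seg rest h
    simp only [List.cons_append, pvProcB, if_neg (h x (by simp))]
    rw [ih _ _ (fun c hc => h c (by simp [hc]))]
    simp [List.append_assoc]

def pvSplit (pre : List Char) : List Char → List (List Char)
  | [] => [pre]
  | c :: cs => if c = '*' then pre :: pvSplit [] cs else pvSplit (pre ++ [c]) cs

theorem pvGo : ∀ (fuel : Nat) (l cur : List Char) (acc : List (List Char)), l.length < fuel →
    PySem.Chars.splitOn.go ['*'] fuel l cur acc = acc.reverse ++ pvSplit cur.reverse l := by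
  intro fuel
  induction fuel with
  | zero => intro l cur acc h; omega
  | succ fuel ih =>
    intro l cur acc h
    cases l with
    | nil =>
      simp [PySem.Chars.splitOn.go, pvSplit]
    | cons c rest =>
      conv_lhs => rw [PySem.Chars.splitOn.go]
      by_cases hc : c = '*'
      · subst hc
        rw [if_pos (by simp [List.isPrefixOf])]
        rw [ih _ _ _ (by simp at h ⊢; omega)]
        simp [pvSplit, List.reverse_cons]
      · rw [if_neg (by simp [List.isPrefixOf, Ne.symm hc])]
        rw [ih _ _ _ (by simp at h ⊢; omega)]
        simp [pvSplit, hc, List.reverse_cons]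

theorem pvSplitOn_eq (s : List Char) :
    PySem.Chars.splitOn s ['*'] = pvSplit [] s := by
  unfold PySem.Chars.splitOn
  rw [pvGo _ _ _ _ (by omega)]
  rfl

theorem pvSplit_no_star : ∀ (xs pre : List Char), (∀ c ∈ xs, c ≠ '*') →
    pvSplit pre xs = [pre ++ xs] := by
  intro xs
  induction xs with
  | nil => intro pre _; simp [pvSplit]
  | cons x xs ih =>
    intro pre h
    simp only [pvSplit, if_neg (h x (by simp))]
    rw [ih _ (fun c hc => h c (by simp [hc]))]
    simp [List.append_assoc]

theorem pvSplit_chunk : ∀ (xs : List Char) (pre ys : List Char), (∀ c ∈ xs, c ≠ '*') →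
    pvSplit pre (xs ++ '*' :: ys) = (pre ++ xs) :: pvSplit [] ys := by
  intro xs
  induction xs with
  | nil => intro pre ys _; simp [pvSplit]
  | cons x xs ih =>
    intro pre ys h
    simp only [List.cons_append, pvSplit, if_neg (h x (by simp))]
    rw [ih _ _ (fun c hc => h c (by simp [hc]))]
    simp [List.append_assoc]

def pvChunk (tokens : List (List Char)) : List Char :=
  (tokens.map (fun t => '*' :: t)).flatten

theorem pvSplit_chunks : ∀ (tokens : List (List Char)) (cur : List Char),
    (∀ c ∈ cur, c ≠ '*') → (∀ t ∈ tokens, ∀ c ∈ t, c ≠ '*') →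
    pvSplit [] (cur ++ pvChunk tokens) = cur :: tokens := by
  intro tokens
  induction tokens with
  | nil =>
    intro cur hcur _
    simpa [pvChunk] using pvSplit_no_star cur [] hcur
  | cons t ts ih =>
    intro cur hcur htok
    have : cur ++ pvChunk (t :: ts) = cur ++ '*' :: (t ++ pvChunk ts) := by
      simp [pvChunk, List.append_assoc]
    rw [this, pvSplit_chunk cur [] (t ++ pvChunk ts) hcur]
    rw [ih t (htok t (by simp)) (fun u hu c hc => htok u (by simp [hu]) c hc)]
    simp

-- ---- collapse on a well-formed segment ----

theorem pvNoStar_isIn (seg : List Char) (h : '*' ∉ seg) :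
    PySem.Chars.isIn ['*'] seg = false := by
  rw [PySem.Chars.isIn_eq_false_iff]
  intro hinf
  exact h ((List.singleton_infix_iff '*' seg).mp hinf)

theorem pvStar_isIn (seg : List Char) (h : '*' ∈ seg) :
    PySem.Chars.isIn ['*'] seg = true := by
  rw [PySem.Chars.isIn_iff_infix]
  exact (List.singleton_infix_iff '*' seg).mpr h

theorem pvCollapse_no_star (seg : List Char) (h : '*' ∉ seg) : pyCollapse seg = seg := by
  unfold pyCollapse
  rw [pvNoStar_isIn seg h]
  simp

theorem pvCollapse_eq_foldl (tokens : List (List Char)) (cur : List Char)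
    (hcur : ∀ c ∈ cur, c ≠ '*')
    (htok : ∀ t ∈ tokens, ∀ c ∈ t, c ≠ '*') :
    pyCollapse (cur ++ pvChunk tokens) = tokens.foldl pvF cur := by
  cases tokens with
  | nil =>
    simp only [pvChunk, List.map_nil, List.flatten_nil, List.append_nil, List.foldl_nil]
    exact pvCollapse_no_star cur (fun hm => hcur '*' hm rfl)
  | cons t ts =>
    unfold pyCollapse
    rw [pvStar_isIn _ (by simp [pvChunk])]
    simp only [if_true]
    rw [pvSplitOn_eq, pvSplit_chunks (t :: ts) cur hcur htok]
    rfl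

-- ---- the A-side spec consumes a '*'-chunk exactly as a fold ----

theorem pvProc_chunk : ∀ (tokens : List (List Char)) (cur opRest : List Char),
    (∀ t ∈ tokens, t ≠ [] ∧ ∀ c ∈ t, PySem.Chars.isdigit c = true) →
    (opRest = [] ∨ ∃ c cs, opRest = c :: cs ∧ PySem.Chars.isdigit c = false) →
    pvProc cur (pvChunk tokens ++ opRest) = pvProc (tokens.foldl pvF cur) opRest := by
  intro tokens
  induction tokens with
  | nil => intro cur opRest _ _; simp [pvChunk]
  | cons t ts ih =>
    intro cur opRest htok hop
    have hsh : pvChunk (t :: ts) ++ opRest = '*' :: (t ++ (pvChunk ts ++ opRest)) := by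
      simp [pvChunk, List.append_assoc]
    rw [hsh, pvProc, if_pos rfl]
    have htw : (t ++ (pvChunk ts ++ opRest)).takeWhile PySem.Chars.isdigit = t ∧
        (t ++ (pvChunk ts ++ opRest)).drop t.length = pvChunk ts ++ opRest := by
      apply pvTakeWhile_append _ _ _ ((htok t (by simp)).2)
      cases ts with
      | nil =>
        rcases hop with rfl | ⟨c, cs, rfl, hc⟩
        · left; simp [pvChunk]
        · right; exact ⟨c, cs, by simp [pvChunk], hc⟩
      | cons t' ts' =>
        right
        exact ⟨'*', t' ++ (pvChunk ts' ++ opRest), by simp [pvChunk, List.append_assoc], by decide⟩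
    rw [htw.1, htw.2]
    rw [ih (pvF cur t) opRest (fun u hu => htok u (by simp [hu])) hop]
    rfl

-- ---- decomposing a well-formed tail into '*'-chunks and an additive rest ----

theorem pvChunk_no_pm (tokens : List (List Char))
    (htok : ∀ t ∈ tokens, t ≠ [] ∧ ∀ c ∈ t, PySem.Chars.isdigit c = true) :
    ∀ c ∈ pvChunk tokens, ¬(c = '+' ∨ c = '-') := by
  intro c hc
  simp only [pvChunk, List.mem_flatten, List.mem_map] at hc
  obtain ⟨l, ⟨t, ht, rfl⟩, hcl⟩ := hc
  rcases List.mem_cons.mp hcl with rfl | hct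
  · decide
  · rw [pvDigit_not_plus_minus ((htok t ht).2 c hct)]
    exact not_false

theorem pvTail_decomp : ∀ (n : Nat) (rest : List Char), rest.length ≤ n → pvTail rest = true →
    ∃ (tokens : List (List Char)) (opRest : List Char),
      rest = pvChunk tokens ++ opRest ∧
      (∀ t ∈ tokens, t ≠ [] ∧ ∀ c ∈ t, PySem.Chars.isdigit c = true) ∧
      (opRest = [] ∨ ∃ c cs, opRest = c :: cs ∧ (c = '+' ∨ c = '-') ∧ pvWf cs false = true) := by
  intro n
  induction n with
  | zero =>
    intro rest hn htail
    have : rest = [] := by cases rest with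
      | nil => rfl
      | cons c cs => simp at hn
    subst this
    exact ⟨[], [], by simp [pvChunk], by simp, Or.inl rfl⟩
  | succ n ih =>
    intro rest hn htail
    cases rest with
    | nil => exact ⟨[], [], by simp [pvChunk], by simp, Or.inl rfl⟩
    | cons c cs =>
      have htail' : pvIsOp3 c = true ∧ pvWf cs false = true := by
        simpa [pvTail, Bool.and_eq_true] using htail
      rcases pvIsOp3_cases htail'.1 with hc | hc | hc
      · exact ⟨[], c :: cs, by simp [pvChunk], by simp, Or.inr ⟨c, cs, rfl, Or.inl hc, htail'.2⟩⟩
      · exact ⟨[], c :: cs, by simp [pvChunk], by simp, Or.inr ⟨c, cs, rfl, Or.inr hc, htail'.2⟩⟩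
      · subst hc
        obtain ⟨hne, htail2⟩ := pvWf_false_decomp cs htail'.2
        have hlen : (cs.drop (cs.takeWhile PySem.Chars.isdigit).length).length ≤ n := by
          simp only [List.length_drop]
          simp only [List.length_cons] at hn
          omega
        obtain ⟨tokens, opRest, heq, htok, hop⟩ := ih _ hlen htail2
        refine ⟨cs.takeWhile PySem.Chars.isdigit :: tokens, opRest, ?_, ?_, hop⟩
        · have : cs = cs.takeWhile PySem.Chars.isdigit
              ++ cs.drop (cs.takeWhile PySem.Chars.isdigit).length :=
            (pvTakeWhile_drop _ cs).symm
          conv_lhs => rw [this, heq]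
          simp [pvChunk, List.append_assoc]
        · intro t ht
          rcases List.mem_cons.mp ht with rfl | ht
          · exact ⟨hne, fun d hd => List.mem_takeWhile_imp hd⟩
          · exact htok t ht

-- ---- B equals the A-side spec on a well-formed string ----

theorem pvMainB : ∀ (n : Nat) (rest cur : List Char), rest.length ≤ n → cur ≠ [] →
    (∀ c ∈ cur, PySem.Chars.isdigit c = true) → pvTail rest = true →
    pvProcB [] (cur ++ rest) = pvProc cur rest := by
  intro n
  induction n with
  | zero =>
    intro rest cur hn hcur hdig htail
    have : rest = [] := by cases rest with
      | nil => rfl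
      | cons c cs => simp at hn
    subst this
    rw [pvEat cur [] [] (fun c hc => by
      rw [pvDigit_not_plus_minus (hdig c hc)]; exact not_false)]
    simp only [List.nil_append]
    show pyCollapse cur = pvProc cur []
    rw [pvCollapse_no_star cur (fun hm => pvDigit_not_star (hdig '*' hm) rfl)]
    rw [pvProc]
  | succ n ih =>
    intro rest cur hn hcur hdig htail
    obtain ⟨tokens, opRest, heq, htok, hop⟩ :=
      pvTail_decomp rest.length rest (le_refl _) htail
    have hcy : ∀ c ∈ cur ++ pvChunk tokens, ¬(c = '+' ∨ c = '-') := by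
      intro c hc
      rcases List.mem_append.mp hc with hc | hc
      · rw [pvDigit_not_plus_minus (hdig c hc)]; exact not_false
      · exact pvChunk_no_pm tokens htok c hc
    have hcurstar : ∀ c ∈ cur, c ≠ '*' := fun c hc => pvDigit_not_star (hdig c hc)
    have htokstar : ∀ t ∈ tokens, ∀ c ∈ t, c ≠ '*' :=
      fun t ht c hc => pvDigit_not_star ((htok t ht).2 c hc)
    have hopd : opRest = [] ∨ ∃ c cs, opRest = c :: cs ∧ PySem.Chars.isdigit c = false := by
      rcases hop with rfl | ⟨c, cs, rfl, hc, _⟩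
      · exact Or.inl rfl
      · exact Or.inr ⟨c, cs, rfl, pvOp2_not_digit hc⟩
    rw [heq]
    rw [show cur ++ (pvChunk tokens ++ opRest) = (cur ++ pvChunk tokens) ++ opRest by
      simp [List.append_assoc]]
    rw [pvEat (cur ++ pvChunk tokens) [] opRest hcy]
    simp only [List.nil_append]
    rw [pvProc_chunk tokens cur opRest htok hopd]
    rcases hop with rfl | ⟨c, cs, rfl, hcop, hwf⟩
    · show pyCollapse (cur ++ pvChunk tokens) = pvProc (tokens.foldl pvF cur) []
      rw [pvCollapse_eq_foldl tokens cur hcurstar htokstar]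
      rw [pvProc]
    · have hcne : ¬ c = '*' := by rcases hcop with rfl | rfl <;> decide
      obtain ⟨hne2, htail3⟩ := pvWf_false_decomp cs hwf
      have hsplit2 : cs.takeWhile PySem.Chars.isdigit
          ++ cs.drop (cs.takeWhile PySem.Chars.isdigit).length = cs := pvTakeWhile_drop _ cs
      have hlen2 : (cs.drop (cs.takeWhile PySem.Chars.isdigit).length).length ≤ n := by
        have : rest.length ≤ n + 1 := hn
        rw [heq] at this
        simp only [List.length_append, List.length_cons, List.length_drop] at this ⊢
        omega
      show pvProcB (cur ++ pvChunk tokens) (c :: cs) = pvProc (tokens.foldl pvF cur) (c :: cs)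
      rw [show pvProcB (cur ++ pvChunk tokens) (c :: cs)
          = pyCollapse (cur ++ pvChunk tokens) ++ c :: pvProcB [] cs by
        rw [pvProcB]; rw [if_pos hcop]]
      rw [pvCollapse_eq_foldl tokens cur hcurstar htokstar]
      conv_lhs => rw [← hsplit2]
      rw [ih (cs.drop (cs.takeWhile PySem.Chars.isdigit).length)
        (cs.takeWhile PySem.Chars.isdigit) hlen2 hne2
        (fun d hd => List.mem_takeWhile_imp hd) htail3]
      conv_rhs => rw [pvProc]
      rw [if_neg hcne]

-- ---- strings without '*': both programs return the input ----

theorem pvLoopA_no_star : ∀ (n : Nat) (exp : List Char) (l k : Nat),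
    exp.length - (l + k) ≤ n → '*' ∉ exp → pyLoopA exp l k = exp := by
  intro n
  induction n with
  | zero =>
    intro exp l k hn hstar
    rw [pyLoopA, dif_neg (by omega)]
  | succ n ih =>
    intro exp l k hn hstar
    by_cases h : l + k < exp.length
    · rw [pyLoopA, dif_pos h]
      have hcmem : exp[l + k] ∈ exp := List.getElem_mem h
      have hcstar : ¬ exp[l + k] = '*' := fun he => hstar (he ▸ hcmem)
      by_cases hop : exp[l + k] = '+' ∨ exp[l + k] = '-'
      · rw [if_pos hop]
        exact ih exp (l + k + 1) 0 (by omega) hstar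
      · rw [if_neg hop, dif_neg hcstar]
        exact ih exp l (k + 1) (by omega) hstar
    · rw [pyLoopA, dif_neg h]

theorem pvProcB_no_star : ∀ (cs seg : List Char), '*' ∉ seg → '*' ∉ cs →
    pvProcB seg cs = seg ++ cs := by
  intro cs
  induction cs with
  | nil =>
    intro seg hseg _
    show pyCollapse seg = seg ++ []
    rw [pvCollapse_no_star seg hseg, List.append_nil]
  | cons c cs ih =>
    intro seg hseg hcs
    have hc : c ≠ '*' := fun he => hcs (he ▸ List.mem_cons_self)
    have hcs' : '*' ∉ cs := fun hm => hcs (List.mem_cons_of_mem _ hm)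
    by_cases hop : c = '+' ∨ c = '-'
    · rw [show pvProcB seg (c :: cs) = pyCollapse seg ++ c :: pvProcB [] cs by
        rw [pvProcB]; rw [if_pos hop]]
      rw [pvCollapse_no_star seg hseg, ih [] (by simp) hcs']
      simp
    · rw [show pvProcB seg (c :: cs) = pvProcB (seg ++ [c]) cs by
        rw [pvProcB]; rw [if_neg hop]]
      rw [ih (seg ++ [c]) (by
        intro hm
        rcases List.mem_append.mp hm with hm | hm
        · exact hseg hm
        · exact hc (List.mem_singleton.mp hm).symm) hcs']
      simp [List.append_assoc]

-- ===== VERDICT (by name: the statement is the Claim_ definition above) =====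
theorem eval_mult_spec : Claim_equal_eval_mult := by
  unfold Claim_equal_eval_mult
  intro exp _ hpre
  unfold Spec_eval_mult eval_mult eval_mult_alt
  rcases hpre with hns | hwf
  · -- no '*' anywhere: A's loop never edits, B's segments are untouched
    have hnstar : '*' ∉ exp.toList := by
      intro hmem
      have h1 : PySem.Str.isIn "*" exp = true := by
        rw [PySem.Str.isIn_iff_infix]
        exact (List.singleton_infix_iff '*' exp.toList).mpr hmem
      rw [hns] at h1
      exact Bool.false_ne_true h1
    rw [pvLoopA_no_star exp.toList.length exp.toList 0 1 (by omega) hnstar]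
    simp only [pvFoldB, List.nil_append]
    rw [pvProcB_no_star exp.toList [] (by simp) hnstar]
    simp
  · -- well-formed digit expression
    obtain ⟨hne, htail⟩ := pvWf_false_decomp exp.toList hwf
    have hsplit : exp.toList.takeWhile PySem.Chars.isdigit
        ++ exp.toList.drop (exp.toList.takeWhile PySem.Chars.isdigit).length = exp.toList :=
      pvTakeWhile_drop _ exp.toList
    have hdig : ∀ c ∈ exp.toList.takeWhile PySem.Chars.isdigit, PySem.Chars.isdigit c = true :=
      fun c hc => List.mem_takeWhile_imp hc
    have hA := pvMainA (exp.toList.drop (exp.toList.takeWhile PySem.Chars.isdigit).length).length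
      (exp.toList.drop (exp.toList.takeWhile PySem.Chars.isdigit).length) []
      (exp.toList.takeWhile PySem.Chars.isdigit) 1 (Nat.le_refl _) hne
      (List.length_pos_of_ne_nil hne)
      (fun c hc => hdig c (List.mem_of_mem_drop hc)) htail
    simp only [List.nil_append, List.length_nil] at hA
    have hB := pvMainB (exp.toList.drop (exp.toList.takeWhile PySem.Chars.isdigit).length).length
      (exp.toList.drop (exp.toList.takeWhile PySem.Chars.isdigit).length)
      (exp.toList.takeWhile PySem.Chars.isdigit) (Nat.le_refl _) hne hdig htail
    simp only [pvFoldB, List.nil_append]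
    conv_lhs => rw [← hsplit]
    conv_rhs => rw [← hsplit]
    rw [hA, hB]
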